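-- pv_equiv track=rewrite | github.com/Toshiro-kyun/improg_sheet | cheatsheet.py | recursive_permutation
-- ===== SOURCE A (Python) =====
-- def recursive_permutation(s):
--   # Base case: if the string is empty, return an empty list of permutations
--   if s == "":
--     return [""]
--
--   result = []
--   # Process each character in the string
--   for i in range(len(s)):
--     # Choose the character at index i
--     char = s[i]
--     # Rest of the string after removing char
--     remaining = s[:i] + s[i+1:]
--
--     # Recursive call for permutations of the remaining string
--     for perm in recursive_permutation(remaining):
--       # Append both lowercase and uppercase variations
--       result.append(char.lower() + perm)
--       result.append(char.upper() + perm)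
--
--   return result
-- ===== SOURCE B (Python) =====
-- def recursive_permutation(s):
--     n = len(s)
--     # breadth-first iterative expansion: (built prefix, remaining chars)
--     parts = [("", s)]
--     for _ in range(n):
--         parts = [(p + r[i], r[:i] + r[i + 1:]) for (p, r) in parts for i in range(len(r))]
--     result = []
--     for (p, _) in parts:
--         for mask in range(1 << n):
--             m = mask
--             out = []
--             for c in p:
--                 out.append(c.upper() if m & 1 else c.lower())
--                 m >>= 1
--             result.append("".join(out))
--     return result
-- ===== Notes on version B (the rewrite author's own statement) =====
-- stated objective: alternative
-- what changed: A fuses permutation choice and per-character casing into one depth-first recursion; B instead builds all permutations by an iterative breadth-first expansion of (prefix, remaining) pairs and then applies every case pattern as a bit mask (first character = least-significant bit) in a separate pass.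
import Mathlib
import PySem

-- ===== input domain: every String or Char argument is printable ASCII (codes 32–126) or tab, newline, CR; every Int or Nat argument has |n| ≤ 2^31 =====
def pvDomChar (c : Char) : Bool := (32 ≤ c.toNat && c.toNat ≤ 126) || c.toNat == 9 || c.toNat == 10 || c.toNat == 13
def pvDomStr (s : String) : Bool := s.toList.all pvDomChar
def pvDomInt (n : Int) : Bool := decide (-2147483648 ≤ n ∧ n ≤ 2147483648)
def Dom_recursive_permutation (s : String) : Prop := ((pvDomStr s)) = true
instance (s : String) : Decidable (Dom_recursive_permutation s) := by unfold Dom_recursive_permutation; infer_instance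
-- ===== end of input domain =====

-- B replaces A's fused depth-first "pick index i, recurse, emit lower/upper pairs" recursion by an
-- iterative breadth-first permutation expansion followed by a separate bit-mask casing pass
-- (alternative decomposition, same cost); return values proved equal on all inputs.

-- ===== PORT A =====
-- core of A over List Char (the returned strings are materialised at the end; same values)
def recAuxA (s : List Char) : List (List Char) :=
  if s = [] then [[]]
  else
    (List.range s.length).attach.foldl
      (fun result i =>
        let c := s.getD i.1 ' '
        let sub := recAuxA (s.take i.1 ++ s.drop (i.1 + 1))
        sub.foldl
          (fun r p => r ++ [PySem.Chars.lowerChar c :: p, PySem.Chars.upperChar c :: p]) result)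
      []
termination_by s.length
decreasing_by
  have := List.mem_range.mp i.2
  simp [List.length_append, List.length_take, List.length_drop]
  omega

def recursive_permutation (s : String) : List String :=
  (recAuxA s.toList).map String.ofList

-- ===== PORT B =====
-- one breadth-first expansion step: move each still-remaining character to the end of the prefix
def stepB (parts : List (List Char × List Char)) : List (List Char × List Char) :=
  parts.flatMap (fun pr =>
    (List.range pr.2.length).map (fun i =>
      (pr.1 ++ [pr.2.getD i ' '], pr.2.take i ++ pr.2.drop (i + 1))))

-- B's inner casing loop: bit 0 of m cases the first character, m is shifted right each step
def caseChars (m : Nat) : List Char → List Char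
  | [] => []
  | c :: cs =>
      (if m &&& 1 = 1 then PySem.Chars.upperChar c else PySem.Chars.lowerChar c) :: caseChars (m >>> 1) cs

def recursive_permutation_alt (s : String) : List String :=
  let n := s.toList.length
  let parts := (List.range n).foldl (fun ps _ => stepB ps) [([], s.toList)]
  parts.foldl
    (fun result pr =>
      (List.range (1 <<< n)).foldl
        (fun r m => r ++ [String.ofList (caseChars m pr.1)]) result)
    []

-- ===== PRECONDITION & SPEC =====
def Spec_recursive_permutation (s : String) (out : List String) : Prop := out = recursive_permutation_alt s
instance (s : String) (out : List String) : Decidable (Spec_recursive_permutation s out) := by unfold Spec_recursive_permutation; infer_instance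

-- ===== CLAIM (what is proved, stated in full; the proofs are below) =====
def Claim_equal_recursive_permutation : Prop := ∀ (s : String), Dom_recursive_permutation s → Spec_recursive_permutation s (recursive_permutation s)

-- ===== LEMMAS AND PROOFS =====

-- reference enumeration of the permutations in A's index-removal order, fuelled by the length
def permsF : Nat → List Char → List (List Char)
  | 0, _ => [[]]
  | n+1, l =>
      (List.range l.length).flatMap (fun i =>
        (permsF n (l.take i ++ l.drop (i + 1))).map (fun q => l.getD i ' ' :: q))

theorem pvRange_two_mul (N : Nat) :
    List.range (2 * N) = (List.range N).flatMap (fun k => [2 * k, 2 * k + 1]) := by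
  induction N with
  | zero => rfl
  | succ n ih =>
      have : 2 * (n + 1) = (2 * n + 1) + 1 := by omega
      rw [this, List.range_succ, List.range_succ, List.range_succ, ih]
      simp [List.flatMap_append]

theorem caseChars_two_mul (b k : Nat) (hb : b < 2) (c : Char) (q : List Char) :
    caseChars (2 * k + b) (c :: q) =
      (if b = 1 then PySem.Chars.upperChar c else PySem.Chars.lowerChar c) :: caseChars k q := by
  have h1 : (2 * k + b) &&& 1 = b := by
    rw [Nat.and_one_is_mod]; omega
  have h2 : (2 * k + b) >>> 1 = k := by
    rw [Nat.shiftRight_eq_div_pow]; omega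
  simp [caseChars, h1, h2]

theorem mask_lemma (n : Nat) (c : Char) (q : List Char) :
    (List.range (2 ^ (n + 1))).map (fun m => caseChars m (c :: q)) =
      (List.range (2 ^ n)).flatMap
        (fun k => [PySem.Chars.lowerChar c :: caseChars k q,
                   PySem.Chars.upperChar c :: caseChars k q]) := by
  have h : 2 ^ (n + 1) = 2 * 2 ^ n := by ring
  rw [h, pvRange_two_mul, List.map_flatMap]
  refine List.flatMap_congr ?_
  intro k _
  have h0 := caseChars_two_mul 0 k (by omega) c q
  have h1 := caseChars_two_mul 1 k (by omega) c q
  simp at h0 h1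
  simp [h0, h1]

theorem attach_flatMap_range (L : Nat) (G : Nat → List (List Char)) :
    (List.range L).attach.flatMap (fun i => G i.1) = (List.range L).flatMap G := by
  conv_rhs => rw [← List.attach_map_subtype_val (List.range L)]
  rw [List.flatMap_map]

theorem recAuxA_eq (n : Nat) (l : List Char) (hn : l.length = n) :
    recAuxA l =
      (permsF l.length l).flatMap
        (fun p => (List.range (2 ^ l.length)).map (fun m => caseChars m p)) := by
  induction n using Nat.strong_induction_on generalizing l with
  | _ n ih =>
  by_cases hl : l = []
  · subst hl; simp [recAuxA, permsF, caseChars]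
  · rw [recAuxA, if_neg hl]
    simp only [PySem.List.foldl_append_eq_flatMap, List.nil_append]
    rw [attach_flatMap_range l.length (fun i =>
      List.flatMap
        (fun p => [PySem.Chars.lowerChar (l.getD i ' ') :: p, PySem.Chars.upperChar (l.getD i ' ') :: p])
        (recAuxA (List.take i l ++ List.drop (i + 1) l)))]
    obtain ⟨k, hlk⟩ : ∃ k, l.length = k + 1 := by
      cases l with
      | nil => exact absurd rfl hl
      | cons a t => exact ⟨t.length, by simp⟩
    rw [hlk, permsF]
    rw [hlk, List.flatMap_assoc]
    refine List.flatMap_congr ?_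
    intro i hi
    have hilt : i < k + 1 := List.mem_range.mp hi
    have hremlen : (List.take i l ++ List.drop (i + 1) l).length = k := by
      simp [List.length_take, List.length_drop]; omega
    rw [ih k (by omega) _ hremlen, hremlen, List.flatMap_assoc, List.flatMap_map]
    refine List.flatMap_congr ?_
    intro q hq
    rw [List.flatMap_map, mask_lemma]

theorem foldl_range_stepB (k : Nat) (parts : List (List Char × List Char)) :
    (List.range k).foldl (fun ps _ => stepB ps) parts = stepB^[k] parts := by
  induction k generalizing parts with
  | zero => rfl
  | succ m ihm =>
      rw [List.range_succ, List.foldl_append, ihm, Function.iterate_succ_apply']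
      rfl

theorem iterate_stepB (k : Nat) (parts : List (List Char × List Char))
    (h : ∀ pr ∈ parts, pr.2.length = k) :
    stepB^[k] parts =
      parts.flatMap (fun pr => (permsF k pr.2).map (fun q => (pr.1 ++ q, ([] : List Char)))) := by
  induction k generalizing parts with
  | zero =>
      simp only [Function.iterate_zero, id_eq, permsF]
      symm
      calc parts.flatMap (fun pr => [[]].map fun q => (pr.1 ++ q, ([] : List Char)))
          = parts.flatMap (fun pr => [pr]) := by
            refine List.flatMap_congr ?_
            intro pr hpr
            have h3 : pr.2 = [] := List.eq_nil_of_length_eq_zero (h pr hpr)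
            simp [Prod.ext_iff, h3]
        _ = parts := by simp
  | succ m ihm =>
      rw [Function.iterate_succ_apply, ihm]
      · rw [stepB, List.flatMap_assoc]
        refine List.flatMap_congr ?_
        intro pr hpr
        have hlen := h pr hpr
        rw [hlen, permsF, hlen, List.map_flatMap, List.flatMap_map]
        refine List.flatMap_congr ?_
        intro i hi
        simp
      · intro pr' hpr'
        rw [stepB] at hpr'
        obtain ⟨pr, hpr, hmem⟩ := List.mem_flatMap.mp hpr'
        obtain ⟨i, hi, rfl⟩ := List.mem_map.mp hmem
        have := h pr hpr
        have hilt := List.mem_range.mp hi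
        simp [List.length_take, List.length_drop]
        omega

theorem ports_eq (s : String) : recursive_permutation s = recursive_permutation_alt s := by
  rw [recursive_permutation, recursive_permutation_alt]
  rw [foldl_range_stepB, iterate_stepB _ _ (by simp)]
  simp only [PySem.List.foldl_append_singleton_eq_map, PySem.List.foldl_append_eq_flatMap,
    List.nil_append, List.flatMap_singleton, List.nil_append]
  rw [recAuxA_eq s.toList.length s.toList rfl, List.map_flatMap, List.flatMap_map]
  rw [Nat.one_shiftLeft]
  simp [List.map_map, Function.comp_def]

-- ===== VERDICT (by name: the statement is the Claim_ definition above) =====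
theorem recursive_permutation_spec : Claim_equal_recursive_permutation := by
  intro s _
  unfold Spec_recursive_permutation
  exact ports_eq s
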